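-- pv_equiv track=rewrite | github.com/DebasishMohanta10/Python-Programming | Introduction to Python/ArrayProblemSolving/matrix_operation/upper_n_lower_triangular_matrix.py | upperTriangular
-- ===== SOURCE A (Python) =====
-- def upperTriangular(mat,m,n):
--     upTri =[]
--     for i in range(m):
--         upTri.append([0]*n)
--     for i in range(m):
--         for j in range(n):
--             if i > j:
--                 upTri[i][j] = 0
--             else:
--                 upTri[i][j] = mat[i][j]
--     return upTri
-- ===== SOURCE B (Python) =====
-- def upperTriangular(mat, m, n):
--     res = []
--     for i in range(m):
--         if i >= n:
--             res.append([0] * n)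
--         else:
--             res.append([0] * i + list(mat[i][i:n]))
--     return res
-- ===== Notes on version B (the rewrite author's own statement) =====
-- stated objective: simpler
-- what changed: Single pass over rows that builds each row directly as leading zeros plus a slice of the source row, instead of pre-allocating an m-by-n zero matrix and then overwriting every cell in a nested elementwise loop with a branch.
import Mathlib
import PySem

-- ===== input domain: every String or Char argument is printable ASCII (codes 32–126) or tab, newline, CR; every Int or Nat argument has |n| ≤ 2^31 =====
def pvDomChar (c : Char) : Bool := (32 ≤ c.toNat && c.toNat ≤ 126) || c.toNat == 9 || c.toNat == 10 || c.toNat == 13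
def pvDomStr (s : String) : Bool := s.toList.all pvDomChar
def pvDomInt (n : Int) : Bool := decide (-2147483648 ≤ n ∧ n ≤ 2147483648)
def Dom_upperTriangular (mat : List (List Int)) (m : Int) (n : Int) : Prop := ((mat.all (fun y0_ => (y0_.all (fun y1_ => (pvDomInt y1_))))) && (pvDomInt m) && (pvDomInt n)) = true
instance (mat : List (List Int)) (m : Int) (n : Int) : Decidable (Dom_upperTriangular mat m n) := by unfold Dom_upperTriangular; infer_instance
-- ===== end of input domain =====

-- B builds each row in a single pass as leading zeros plus a slice of the source row,
-- instead of A's pre-allocated zero matrix overwritten cell by cell by a nested loop (objective: simpler).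

-- ===== PORT A =====
def upperTriangular (mat : List (List Int)) (m : Int) (n : Int) : List (List Int) :=
  let upTri := (PySem.List.pyRange 0 m 1).foldl (fun acc _ => acc ++ [List.replicate n.toNat (0 : Int)]) []
  (PySem.List.pyRange 0 m 1).foldl (fun ut i =>
    (PySem.List.pyRange 0 n 1).foldl (fun ut j =>
      PySem.List.pySetD ut i
        (PySem.List.pySetD (PySem.List.pyGetD ut i [])
          j (if i > j then 0 else PySem.List.pyGetD (PySem.List.pyGetD mat i []) j 0))) ut) upTri

-- ===== PORT B =====
def upperTriangular_alt (mat : List (List Int)) (m : Int) (n : Int) : List (List Int) :=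
  (PySem.List.pyRange 0 m 1).foldl (fun res i =>
    res ++ [if i ≥ n then List.replicate n.toNat (0 : Int)
            else List.replicate i.toNat (0 : Int) ++
                 PySem.List.slice (PySem.List.pyGetD mat i []) (some i) (some n)]) []

-- ===== PRECONDITION & SPEC =====
-- Pre excludes exactly the inputs where A raises IndexError: some row index i < min(m,n)
-- is missing from mat or row i is shorter than n.
def Pre_upperTriangular (mat : List (List Int)) (m : Int) (n : Int) : Prop :=
  ∀ i ∈ List.range (min m n).toNat, i < mat.length ∧ (n : Int) ≤ (mat.getD i []).length
instance (mat : List (List Int)) (m : Int) (n : Int) : Decidable (Pre_upperTriangular mat m n) := by unfold Pre_upperTriangular; infer_instance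

def pvWitness_upperTriangular : List (List Int) × Int × Int := ([[1, 2], [3, 4]], 2, 2)

def Spec_upperTriangular (mat : List (List Int)) (m : Int) (n : Int) (out : List (List Int)) : Prop := out = upperTriangular_alt mat m n
instance (mat : List (List Int)) (m : Int) (n : Int) (out : List (List Int)) : Decidable (Spec_upperTriangular mat m n out) := by unfold Spec_upperTriangular; infer_instance

-- ===== CLAIM (what is proved, stated in full; the proofs are below) =====
def Claim_equal_upperTriangular : Prop := ∀ (mat : List (List Int)) (m : Int) (n : Int), Dom_upperTriangular mat m n → Pre_upperTriangular mat m n → Spec_upperTriangular mat m n (upperTriangular mat m n)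

-- ===== LEMMAS AND PROOFS =====

-- the row A's nested loop produces at row index i
def pvRowA (mat : List (List Int)) (i : Int) (N : Nat) : List Int :=
  (List.range N).map (fun (j : Nat) => if i > (j : Int) then 0 else PySem.List.pyGetD (PySem.List.pyGetD mat i []) (j : Int) 0)

-- writing cells 0..k-1 of a row of length ≥ k replaces that prefix
lemma pv_set_prefix (g : Int → Int) :
    ∀ (k : Nat) (row : List Int), k ≤ row.length →
      ((List.range k).map (fun (j : Nat) => (j : Int))).foldl (fun r j => PySem.List.pySetD r j (g j)) row
        = (List.range k).map (fun (j : Nat) => g (j : Int)) ++ row.drop k := by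
  intro k
  induction k with
  | zero => simp
  | succ k ih =>
    intro row hk
    rw [List.range_succ, List.map_append, List.map_append, List.foldl_append, ih row (by omega)]
    simp only [List.map_cons, List.map_nil, List.foldl_cons, List.foldl_nil,
      PySem.List.pySetD_natCast]
    rw [List.set_append_right _ _ (by simp)]
    simp only [List.length_map, List.length_range, Nat.sub_self]
    rw [List.drop_eq_getElem_cons (show k < row.length by omega), List.set_cons_zero]
    simp

-- the inner loop only rewrites row i of the state
lemma pv_inner_loop (g : Int → Int) (i : Nat) :
    ∀ (js : List Int) (ut : List (List Int)) (h : i < ut.length),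
      js.foldl (fun u j =>
          PySem.List.pySetD u (i : Int)
            (PySem.List.pySetD (PySem.List.pyGetD u (i : Int) []) j (g j))) ut
        = ut.set i (js.foldl (fun r j => PySem.List.pySetD r j (g j)) ut[i]) := by
  intro js
  induction js with
  | nil => intro ut h; simp [List.set_getElem_self]
  | cons j js ih =>
    intro ut h
    rw [List.foldl_cons, ih _ (by simp; omega)]
    simp [PySem.List.pySetD_natCast, PySem.List.pyGetD_natCast,
      List.getElem?_eq_getElem h, List.getElem_set_self, List.set_set]

-- outer-loop invariant: rows before k are finished, rows from k on are still zero
lemma pv_outer_loop (mat : List (List Int)) (n : Int) :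
    ∀ (c k : Nat),
      ((List.range c).map (fun (t : Nat) => ((k + t : Nat) : Int))).foldl (fun ut i =>
          (PySem.List.pyRange 0 n 1).foldl (fun ut j =>
            PySem.List.pySetD ut i
              (PySem.List.pySetD (PySem.List.pyGetD ut i [])
                j (if i > j then 0 else PySem.List.pyGetD (PySem.List.pyGetD mat i []) j 0))) ut)
        ((List.range k).map (fun (t : Nat) => pvRowA mat (t : Int) n.toNat) ++ List.replicate c (List.replicate n.toNat 0))
      = (List.range (k + c)).map (fun (t : Nat) => pvRowA mat (t : Int) n.toNat) := by
  intro c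
  induction c with
  | zero => simp
  | succ c ih =>
    intro k
    rw [List.range_succ_eq_map, List.map_cons, List.foldl_cons, Nat.add_zero]
    rw [pv_inner_loop _ k _ _ (by simp)]
    have hget : ((List.range k).map (fun (t : Nat) => pvRowA mat (t : Int) n.toNat) ++
        List.replicate (c + 1) (List.replicate n.toNat (0 : Int)))[k]'(by simp)
        = List.replicate n.toNat (0 : Int) := by
      rw [List.getElem_append_right (by simp)]
      simp
    have hrow : (PySem.List.pyRange 0 n 1).foldl
        (fun r j => PySem.List.pySetD r j
          (if (k : Int) > j then 0 else PySem.List.pyGetD (PySem.List.pyGetD mat (k : Int) []) j 0))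
        (List.replicate n.toNat (0 : Int)) = pvRowA mat (k : Int) n.toNat := by
      rw [PySem.List.pyRange_zero n, pv_set_prefix _ _ _ (by simp)]
      simp [pvRowA]
    rw [hget, hrow]
    have hset : ((List.range k).map (fun (t : Nat) => pvRowA mat (t : Int) n.toNat) ++
        List.replicate (c + 1) (List.replicate n.toNat (0 : Int))).set k (pvRowA mat (k : Int) n.toNat)
        = (List.range (k + 1)).map (fun (t : Nat) => pvRowA mat (t : Int) n.toNat) ++
          List.replicate c (List.replicate n.toNat (0 : Int)) := by
      rw [List.set_append_right _ _ (by simp)]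
      simp [List.replicate_succ, List.range_succ]
    rw [hset]
    rw [show (List.map (fun (t : Nat) => ((k + t : Nat) : Int)) (List.map (fun n => n + 1) (List.range c)))
        = (List.range c).map (fun (t : Nat) => (((k + 1) + t : Nat) : Int)) by
      rw [List.map_map]; apply List.map_congr_left; intro t _
      simp only [Function.comp_apply]; push_cast; ring]
    rw [ih (k + 1)]
    have hkc : k + 1 + c = k + (c + 1) := by omega
    rw [hkc]

-- under Pre, A's row i equals B's row i
lemma pv_row_eq (mat : List (List Int)) (m n : Int) (hpre : Pre_upperTriangular mat m n)
    (i : Nat) (him : (i : Int) < m) :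
    pvRowA mat i n.toNat
      = if (i : Int) ≥ n then List.replicate n.toNat (0 : Int)
        else List.replicate ((i : Int)).toNat (0 : Int) ++
             PySem.List.slice (PySem.List.pyGetD mat i []) (some i) (some n) := by
  by_cases h : (i : Int) ≥ n
  · rw [if_pos h]
    rw [List.eq_replicate_iff]
    refine ⟨by simp [pvRowA], ?_⟩
    intro b hb
    simp only [pvRowA, List.mem_map, List.mem_range] at hb
    obtain ⟨j, hj, rfl⟩ := hb
    rw [if_pos (by omega)]
  · rw [if_neg h]
    rw [not_le] at h
    obtain ⟨hi, hn⟩ := hpre i (by rw [List.mem_range]; omega)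
    have h0n : (0 : Int) ≤ n := by omega
    have hrow : PySem.List.pyGetD mat (i : Int) [] = mat.getD i [] := PySem.List.pyGetD_natCast mat i []
    rw [hrow, PySem.List.slice_toNat _ (by positivity) h0n]
    set row := mat.getD i [] with hrowdef
    have hNrow : n.toNat ≤ row.length := by omega
    have hiN : i ≤ n.toNat := by omega
    simp only [Int.toNat_natCast]
    apply List.ext_getElem
    · simp [pvRowA]; omega
    · intro t h1 h2
      simp only [pvRowA, List.getElem_map, List.getElem_range] at h1 ⊢
      have htN : t < n.toNat := by simpa [pvRowA] using h1
      rw [List.getElem_append]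
      split
      · rename_i hlt
        have hlt' : t < i := by exact_mod_cast hlt
        rw [dif_pos (by simpa using hlt'), List.getElem_replicate]
      · rename_i hge
        have hti : i ≤ t := by omega
        rw [dif_neg (by simpa using (by omega : ¬ t < i))]
        simp only [List.length_replicate]
        rw [List.getElem_take, List.getElem_drop]
        rw [hrow, PySem.List.pyGetD_natCast, List.getD_eq_getElem _ _ (by omega)]
        congr 1
        omega

-- ===== VERDICT (by name: the statement is the Claim_ definition above) =====
theorem upperTriangular_spec : Claim_equal_upperTriangular := by
  intro mat m n _ hpre
  unfold Spec_upperTriangular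
  rw [upperTriangular, upperTriangular_alt]
  simp only [PySem.List.foldl_append_singleton_eq_map, List.nil_append]
  have hinit : (PySem.List.pyRange 0 m 1).map (fun _ => List.replicate n.toNat (0 : Int))
      = List.replicate m.toNat (List.replicate n.toNat 0) := by
    rw [PySem.List.pyRange_zero]
    simp [Function.comp_def, List.map_const']
  rw [hinit, PySem.List.pyRange_zero m]
  have := pv_outer_loop mat n m.toNat 0
  simp only [List.range_zero, List.map_nil, List.nil_append, Nat.zero_add] at this
  rw [this]
  rw [List.map_map]
  apply List.map_congr_left
  intro t ht
  rw [List.mem_range] at ht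
  have htm : (t : Int) < m := by omega
  simp only [Function.comp_apply]
  exact pv_row_eq mat m n hpre t htm
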